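-- pv_equiv track=rewrite | github.com/chriskaschner/tublemetry | protocol/scripts/decode_clockdata.py | find_frames
-- ===== SOURCE A (Python) =====
-- def find_frames(clock_edges: list[int], gap_samples: int) -> list[list[int]]:
--     """Group clock edges into frames based on gap threshold."""
--     if not clock_edges:
--         return []
--     frames = []
--     current_frame = [clock_edges[0]]
--     for i in range(1, len(clock_edges)):
--         gap = clock_edges[i] - clock_edges[i - 1]
--         if gap > gap_samples:
--             frames.append(current_frame)
--             current_frame = [clock_edges[i]]
--         else:
--             current_frame.append(clock_edges[i])
--     if current_frame:
--         frames.append(current_frame)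
--     return frames
-- ===== SOURCE B (Python) =====
-- def find_frames(clock_edges: list[int], gap_samples: int) -> list[list[int]]:
--     """Group clock edges into frames based on gap threshold.
--
--     Right-to-left scan building the output back-to-front: each edge either
--     joins the most recently opened frame or opens a new one; everything is
--     stored reversed (append-only) and flipped once at the end.
--     """
--     frames: list[list[int]] = []
--     for x in reversed(clock_edges):
--         if frames and frames[-1][-1] - x <= gap_samples:
--             frames[-1].append(x)
--         else:
--             frames.append([x])
--     frames.reverse()
--     for f in frames:
--         f.reverse()
--     return frames
-- ===== Notes on version B (the rewrite author's own statement) =====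
-- stated objective: alternative
-- what changed: Replaced the forward loop carrying a current_frame accumulator and a final flush by a right-to-left scan that builds the frame list back-to-front append-only (joining the most recently opened frame or opening a new one) and flips the structure once at the end.
import Mathlib
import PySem

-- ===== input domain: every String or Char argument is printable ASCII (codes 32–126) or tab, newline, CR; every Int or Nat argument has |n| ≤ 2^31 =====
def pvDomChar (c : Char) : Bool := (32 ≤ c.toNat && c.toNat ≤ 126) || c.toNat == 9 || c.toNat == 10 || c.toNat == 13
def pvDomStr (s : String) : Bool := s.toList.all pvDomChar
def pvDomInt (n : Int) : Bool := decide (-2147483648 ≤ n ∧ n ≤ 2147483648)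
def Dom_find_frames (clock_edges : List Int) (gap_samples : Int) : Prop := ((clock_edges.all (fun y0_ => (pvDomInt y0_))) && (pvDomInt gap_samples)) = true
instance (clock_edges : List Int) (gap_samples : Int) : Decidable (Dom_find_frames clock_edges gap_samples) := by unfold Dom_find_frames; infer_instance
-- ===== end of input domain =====

-- B builds the frame list back-to-front with a right-to-left scan (alternative
-- decomposition, same O(n) cost); A accumulates a current frame left-to-right.

-- ===== PORT A =====
-- the for-loop over range(1, len): state = (frames, current_frame), walking the
-- remaining elements while carrying the previous element (clock_edges[i-1])
def findFramesGo (gap_samples prev : Int) (current_frame : List Int)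
    (frames : List (List Int)) : List Int → List (List Int)
  | [] => if current_frame.isEmpty then frames else frames ++ [current_frame]
  | x :: rest =>
      if x - prev > gap_samples then
        findFramesGo gap_samples x [x] (frames ++ [current_frame]) rest
      else
        findFramesGo gap_samples x (current_frame ++ [x]) frames rest

def find_frames (clock_edges : List Int) (gap_samples : Int) : List (List Int) :=
  match clock_edges with
  | [] => []
  | h :: t => findFramesGo gap_samples h [h] [] t

-- ===== PORT B =====
-- loop body: 'frames and frames[-1][-1] - x <= gap' is the getLast? match
-- (frames[-1][-1] read via getLast?.getD 0: the last frame is never empty);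
-- frames[-1].append(x) is dropLast ++ [f ++ [x]]
def findFramesStepR (gap_samples : Int) (frames : List (List Int)) (x : Int) :
    List (List Int) :=
  match frames.getLast? with
  | none => [[x]]
  | some f => if f.getLast?.getD 0 - x ≤ gap_samples then
                frames.dropLast ++ [f ++ [x]]
              else frames ++ [[x]]

def find_frames_alt (clock_edges : List Int) (gap_samples : Int) : List (List Int) :=
  ((clock_edges.reverse.foldl (findFramesStepR gap_samples) []).reverse).map List.reverse

-- ===== PRECONDITION & SPEC =====
def Spec_find_frames (clock_edges : List Int) (gap_samples : Int) (out : List (List Int)) : Prop := out = find_frames_alt clock_edges gap_samples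
instance (clock_edges : List Int) (gap_samples : Int) (out : List (List Int)) : Decidable (Spec_find_frames clock_edges gap_samples out) := by unfold Spec_find_frames; infer_instance

-- ===== CLAIM (what is proved, stated in full; the proofs are below) =====
def Claim_equal_find_frames : Prop := ∀ (clock_edges : List Int) (gap_samples : Int), Dom_find_frames clock_edges gap_samples → Spec_find_frames clock_edges gap_samples (find_frames clock_edges gap_samples)

-- ===== LEMMAS AND PROOFS =====

-- head-prepending mirror of findFramesStepR: the reversed scan, seen un-reversed
def pvStep (gap_samples : Int) (frames : List (List Int)) (x : Int) :
    List (List Int) :=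
  match frames with
  | [] => [[x]]
  | f :: fs => if f.headD 0 - x ≤ gap_samples then (x :: f) :: fs
               else [x] :: f :: fs

-- conjugation: findFramesStepR is pvStep under (reverse ∘ map reverse)
theorem pvStepR_conj (gap x : Int) (fr : List (List Int)) :
    ((findFramesStepR gap fr x).reverse).map List.reverse =
      pvStep gap ((fr.reverse).map List.reverse) x := by
  rcases List.eq_nil_or_concat fr with h | ⟨gs, f, h⟩
  · subst h; rfl
  · subst h
    simp [findFramesStepR, pvStep, List.head?_reverse,
      List.headD_eq_head?_getD]
    split_ifs <;> simp

theorem pvFoldl_conj (gap : Int) : ∀ (l : List Int) (init : List (List Int)),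
    ((l.foldl (findFramesStepR gap) init).reverse).map List.reverse =
      l.foldl (pvStep gap) ((init.reverse).map List.reverse) := by
  intro l
  induction l with
  | nil => intro init; rfl
  | cons x r ih => intro init; simp only [List.foldl]; rw [ih, pvStepR_conj]

-- (ext, fs): elements of the tail that extend the current frame, and the later frames
def pvGrp (gap prev : Int) : List Int → List Int × List (List Int)
  | [] => ([], [])
  | x :: r =>
      let p := pvGrp gap x r
      if x - prev > gap then ([], (x :: p.1) :: p.2) else (x :: p.1, p.2)

theorem pvGoA_eq (gap : Int) : ∀ (rest : List Int) (prev : Int) (cur : List Int)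
    (frames : List (List Int)), cur ≠ [] →
    findFramesGo gap prev cur frames rest =
      frames ++ (cur ++ (pvGrp gap prev rest).1) :: (pvGrp gap prev rest).2 := by
  intro rest
  induction rest with
  | nil =>
      intro prev cur frames hcur
      simp [findFramesGo, pvGrp, List.isEmpty_iff, hcur]
  | cons x r ih =>
      intro prev cur frames hcur
      by_cases hgt : x - prev > gap
      · simp only [findFramesGo, pvGrp, if_pos hgt]
        rw [ih x [x] (frames ++ [cur]) (by simp)]
        simp
      · simp only [findFramesGo, pvGrp, if_neg hgt]
        rw [ih x (cur ++ [x]) frames (by simp)]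
        simp

theorem pvFoldr_eq (gap : Int) : ∀ (l : List Int),
    l.foldr (fun x acc => pvStep gap acc x) [] =
      (match l with
       | [] => []
       | h :: t => (h :: (pvGrp gap h t).1) :: (pvGrp gap h t).2) := by
  intro l
  induction l with
  | nil => rfl
  | cons x rest ih =>
      cases rest with
      | nil => rfl
      | cons y r =>
          simp only [List.foldr] at ih ⊢
          rw [ih]
          by_cases hgt : y - x > gap
          · simp [pvStep, pvGrp, if_pos hgt, not_le.mpr hgt]
          · simp [pvStep, pvGrp, if_neg hgt, not_lt.mp hgt]

-- ===== VERDICT (by name: the statement is the Claim_ definition above) =====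
theorem find_frames_spec : Claim_equal_find_frames := by
  intro clock_edges gap_samples _
  unfold Spec_find_frames find_frames find_frames_alt
  rw [pvFoldl_conj]
  simp only [List.reverse_nil, List.map_nil]
  rw [List.foldl_reverse, pvFoldr_eq]
  cases clock_edges with
  | nil => rfl
  | cons h t =>
      have h1 := pvGoA_eq gap_samples t h [h] [] (by simp)
      simpa using h1
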